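-- pv_equiv track=rewrite | github.com/Nordo80/Python | XP/xp01_janguru/janguru.py | meet_me
-- ===== SOURCE A (Python) =====
-- def meet_me(pos1, jump_distance1, sleep1, pos2, jump_distance2, sleep2) -> int:
--     """Calculate the meeting position of 2 jangurus.
--
--     @:param pos1: position of first janguru
--     @:param jump_distance1: jump distance of first janguru
--     @:param sleep1: sleep time of first janguru
--     @:param pos2: position of second janguru
--     @:param jump_distance2: jump distance of second janguru
--     @:param sleep2: sleep time of second janguru
--
--     @:return positions where jangurus first meet
--     """
--     counter1 = 0
--     counter2 = 0
--     sleep1 -= 1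
--     sleep2 -= 1
--     pos1 += jump_distance1
--     pos2 += jump_distance2
--     naruto1 = 0
--     naruto2 = 0
--     for i in range(10000000):
--         if pos1 == pos2:
--             return pos1
--         if sleep1 > naruto1:
--             sleep1 -= 1
--             counter1 += 1
--         else:
--             pos1 += jump_distance1
--             sleep1 = counter1
--             counter1 = 0
--
--         if sleep2 > naruto2:
--             sleep2 -= 1
--             counter2 += 1
--         else:
--             pos2 += jump_distance2
--             sleep2 = counter2
--             counter2 = 0
--     else:
--         return -1
-- ===== SOURCE B (Python) =====
-- def meet_me(pos1, jump_distance1, sleep1, pos2, jump_distance2, sleep2) -> int: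
--     """Event-driven re-implementation: each janguru's position only changes at
--     multiples of its effective period, so step from event to event instead of
--     simulating every time tick."""
--     period1 = sleep1 if sleep1 > 1 else 1
--     period2 = sleep2 if sleep2 > 1 else 1
--     x1 = pos1 + jump_distance1
--     x2 = pos2 + jump_distance2
--     next1 = period1
--     next2 = period2
--     i = 0
--     while i < 10000000:
--         if x1 == x2:
--             return x1
--         i = next1 if next1 <= next2 else next2
--         if i == next1:
--             x1 += jump_distance1
--             next1 += period1
--         if i == next2:
--             x2 += jump_distance2
--             next2 += period2
--     return -1
-- ===== Notes on version B (the rewrite author's own statement) =====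
-- stated objective: faster
-- what changed: A simulates every one of up to 10^7 time ticks updating sleep/counter state; B computes each janguru's effective jump period once and jumps directly from jump event to jump event (positions are closed-form between events), checking equality only there.
import Mathlib
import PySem

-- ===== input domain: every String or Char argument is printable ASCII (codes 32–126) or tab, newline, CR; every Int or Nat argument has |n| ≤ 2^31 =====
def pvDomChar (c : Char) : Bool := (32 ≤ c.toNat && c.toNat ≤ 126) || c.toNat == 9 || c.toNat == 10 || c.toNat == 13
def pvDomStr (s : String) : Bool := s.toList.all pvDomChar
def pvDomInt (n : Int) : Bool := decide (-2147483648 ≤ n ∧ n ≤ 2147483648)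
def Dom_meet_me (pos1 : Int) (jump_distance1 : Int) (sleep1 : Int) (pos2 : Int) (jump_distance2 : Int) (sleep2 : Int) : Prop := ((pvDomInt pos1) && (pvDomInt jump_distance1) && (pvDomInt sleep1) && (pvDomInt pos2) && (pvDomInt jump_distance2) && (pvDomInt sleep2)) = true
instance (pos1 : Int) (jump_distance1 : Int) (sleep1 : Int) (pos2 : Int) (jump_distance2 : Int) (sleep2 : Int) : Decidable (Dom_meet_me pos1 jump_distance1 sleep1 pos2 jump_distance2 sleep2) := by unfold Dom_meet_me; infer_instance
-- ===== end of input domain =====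

-- B replaces A's tick-by-tick 10^7-step simulation by an event-driven loop that
-- steps only from jump event to jump event (objective: faster in the typical case).

-- ===== PORT A =====
-- A's loop: fuel = remaining iterations of `for i in range(10000000)`; the state is
-- (pos1, sleep1, counter1, pos2, sleep2, counter2); naruto1 = naruto2 = 0 are inlined.
def meetA_loop (j1 j2 : Int) : Nat → Int → Int → Int → Int → Int → Int → Int
  | 0, _, _, _, _, _, _ => -1
  | f+1, pos1, sleep1, c1, pos2, sleep2, c2 =>
    if pos1 = pos2 then pos1
    else meetA_loop j1 j2 f
      (if 0 < sleep1 then pos1 else pos1 + j1)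
      (if 0 < sleep1 then sleep1 - 1 else c1)
      (if 0 < sleep1 then c1 + 1 else 0)
      (if 0 < sleep2 then pos2 else pos2 + j2)
      (if 0 < sleep2 then sleep2 - 1 else c2)
      (if 0 < sleep2 then c2 + 1 else 0)

def meet_me (pos1 : Int) (jump_distance1 : Int) (sleep1 : Int) (pos2 : Int) (jump_distance2 : Int) (sleep2 : Int) : Int :=
  meetA_loop jump_distance1 jump_distance2 10000000
    (pos1 + jump_distance1) (sleep1 - 1) 0 (pos2 + jump_distance2) (sleep2 - 1) 0

-- ===== PORT B =====
-- B's while loop; i, next1, next2 and the (positive) periods are nonnegative Python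
-- ints, represented as Nat. The loop advances i by at least 1 towards the 10^7 bound,
-- so fuel 10000001 is enough for every reachable call; fuel only realises termination.
def meetB_loop (j1 j2 : Int) (p1 p2 : Nat) (x1 x2 : Int) (n1 n2 i : Nat) : Nat → Int
  | 0 => -1
  | fuel+1 =>
    if i < 10000000 then
      if x1 = x2 then x1
      else
        meetB_loop j1 j2 p1 p2
          (if (if n1 ≤ n2 then n1 else n2) = n1 then x1 + j1 else x1)
          (if (if n1 ≤ n2 then n1 else n2) = n2 then x2 + j2 else x2)
          (if (if n1 ≤ n2 then n1 else n2) = n1 then n1 + p1 else n1)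
          (if (if n1 ≤ n2 then n1 else n2) = n2 then n2 + p2 else n2)
          (if n1 ≤ n2 then n1 else n2) fuel
    else -1

def meet_me_alt (pos1 : Int) (jump_distance1 : Int) (sleep1 : Int) (pos2 : Int) (jump_distance2 : Int) (sleep2 : Int) : Int :=
  -- period1/period2 are ≥ 1, so .toNat is exact
  let period1 : Nat := (if 1 < sleep1 then sleep1 else 1).toNat
  let period2 : Nat := (if 1 < sleep2 then sleep2 else 1).toNat
  meetB_loop jump_distance1 jump_distance2 period1 period2
    (pos1 + jump_distance1) (pos2 + jump_distance2) period1 period2 0 10000001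

-- ===== PRECONDITION & SPEC =====
def Spec_meet_me (pos1 : Int) (jump_distance1 : Int) (sleep1 : Int) (pos2 : Int) (jump_distance2 : Int) (sleep2 : Int) (out : Int) : Prop := out = meet_me_alt pos1 jump_distance1 sleep1 pos2 jump_distance2 sleep2
instance (pos1 : Int) (jump_distance1 : Int) (sleep1 : Int) (pos2 : Int) (jump_distance2 : Int) (sleep2 : Int) (out : Int) : Decidable (Spec_meet_me pos1 jump_distance1 sleep1 pos2 jump_distance2 sleep2 out) := by unfold Spec_meet_me; infer_instance

-- ===== CLAIM (what is proved, stated in full; the proofs are below) =====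
def Claim_equal_meet_me : Prop := ∀ (pos1 : Int) (jump_distance1 : Int) (sleep1 : Int) (pos2 : Int) (jump_distance2 : Int) (sleep2 : Int), Dom_meet_me pos1 jump_distance1 sleep1 pos2 jump_distance2 sleep2 → Spec_meet_me pos1 jump_distance1 sleep1 pos2 jump_distance2 sleep2 (meet_me pos1 jump_distance1 sleep1 pos2 jump_distance2 sleep2)

-- ===== LEMMAS AND PROOFS =====

-- Position of a janguru (initial pos a, jump j, period p) at time tick i.
def X (a j : Int) (p : Nat) (i : Nat) : Int := a + j * (1 + ((i / p : Nat) : Int))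

-- A's `sleep` variable at the start of iteration i.
def sleepInv (s : Int) (p : Nat) (i : Nat) : Int :=
  if i = 0 then s - 1 else (p : Int) - 1 - ((i % p : Nat) : Int)

-- Reference: tick-by-tick search over the closed-form positions.
def G (a1 j1 a2 j2 : Int) (p1 p2 : Nat) : Nat → Nat → Int
  | 0, _ => -1
  | f+1, i => if X a1 j1 p1 i = X a2 j2 p2 i then X a1 j1 p1 i
              else G a1 j1 a2 j2 p1 p2 f (i+1)

lemma succ_divmod_lt (p i : Nat) (hp : 0 < p) (h : i % p + 1 < p) :
    (i+1)/p = i/p ∧ (i+1)%p = i%p+1 := by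
  have hm := Nat.div_add_mod i p
  exact (Nat.div_mod_unique hp).mpr ⟨by linarith, h⟩

lemma succ_divmod_eq (p i : Nat) (hp : 0 < p) (h : i % p + 1 = p) :
    (i+1)/p = i/p + 1 ∧ (i+1)%p = 0 := by
  have hm := Nat.div_add_mod i p
  refine (Nat.div_mod_unique hp).mpr ⟨?_, hp⟩
  rw [Nat.mul_succ]; linarith

lemma div_stable (p i k : Nat) (hp : 0 < p) (h1 : i ≤ k) (h2 : k < (i/p+1)*p) :
    k/p = i/p := by
  have hm := Nat.div_add_mod i p
  have h2' : k < p * (i / p) + p := by rw [Nat.succ_mul] at h2; linarith [h2]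
  have hle : p * (i / p) ≤ k := le_trans (Nat.le.intro hm) h1
  exact ((Nat.div_mod_unique hp).mpr ⟨Nat.sub_add_cancel hle, by omega⟩).1

lemma X_congr (a j : Int) (p : Nat) {i k : Nat} (h : k / p = i / p) :
    X a j p k = X a j p i := by simp [X, h]

lemma X_succ (a j : Int) (p : Nat) {i k : Nat} (h : k / p = i / p + 1) :
    X a j p k = X a j p i + j := by
  simp only [X, h]; push_cast; ring

-- One iteration of A's per-janguru update realises one tick of the closed form.
lemma stepJ (s : Int) (p : Nat) (a j : Int) (i : Nat) (hp : 0 < p)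
    (hrel : (p : Int) = if 1 < s then s else 1) :
    (if 0 < sleepInv s p i then X a j p i else X a j p i + j) = X a j p (i+1)
  ∧ (if 0 < sleepInv s p i then sleepInv s p i - 1 else ((i % p : Nat) : Int)) = sleepInv s p (i+1)
  ∧ (if 0 < sleepInv s p i then ((i % p : Nat) : Int) + 1 else 0) = (((i+1) % p : Nat) : Int) := by
  by_cases hz : i = 0
  · subst hz
    by_cases hs : 1 < s
    · rw [if_pos hs] at hrel
      have hp2 : 2 ≤ p := by omega
      have h1d : 1 / p = 0 := Nat.div_eq_of_lt (by omega)
      have h1m : 1 % p = 1 := Nat.mod_eq_of_lt (by omega)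
      have hpos : 0 < sleepInv s p 0 := by simp [sleepInv]; omega
      refine ⟨?_, ?_, ?_⟩ <;>
        simp [sleepInv, X, h1d, h1m, Nat.zero_div, Nat.zero_mod] <;> omega
    · rw [if_neg hs] at hrel
      have hp1 : p = 1 := by omega
      have hneg : ¬ 0 < sleepInv s p 0 := by simp [sleepInv]; omega
      subst hp1
      refine ⟨?_, ?_, ?_⟩
      · rw [if_neg hneg]; simp [X]; ring
      · rw [if_neg hneg]; simp [sleepInv]
      · rw [if_neg hneg]; simp
  · have hmod : i % p < p := Nat.mod_lt i hp
    by_cases hpos : 0 < sleepInv s p i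
    · have hlt : i % p + 1 < p := by
        have := hpos; simp [sleepInv, hz] at this; omega
      obtain ⟨hd, hm⟩ := succ_divmod_lt p i hp hlt
      refine ⟨?_, ?_, ?_⟩
      · rw [if_pos hpos]; exact (X_congr a j p hd).symm
      · rw [if_pos hpos]; simp [sleepInv, hz, hm]; omega
      · rw [if_pos hpos, hm]; push_cast; ring
    · have heq : i % p + 1 = p := by
        have := hpos; simp [sleepInv, hz] at this; omega
      obtain ⟨hd, hm⟩ := succ_divmod_eq p i hp heq
      refine ⟨?_, ?_, ?_⟩
      · rw [if_neg hpos]; exact (X_succ a j p hd).symm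
      · rw [if_neg hpos]; simp [sleepInv, hz, hm]; omega
      · rw [if_neg hpos, hm]; simp

-- A's loop computes the reference search.
lemma A_eq (s1 s2 a1 j1 a2 j2 : Int) (p1 p2 : Nat) (hp1 : 0 < p1) (hp2 : 0 < p2)
    (hrel1 : (p1 : Int) = if 1 < s1 then s1 else 1)
    (hrel2 : (p2 : Int) = if 1 < s2 then s2 else 1) :
    ∀ (f i : Nat),
      meetA_loop j1 j2 f (X a1 j1 p1 i) (sleepInv s1 p1 i) ((i % p1 : Nat) : Int)
        (X a2 j2 p2 i) (sleepInv s2 p2 i) ((i % p2 : Nat) : Int)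
      = G a1 j1 a2 j2 p1 p2 f i := by
  intro f
  induction f with
  | zero => intro i; rfl
  | succ f ih =>
    intro i
    obtain ⟨e1a, e1b, e1c⟩ := stepJ s1 p1 a1 j1 i hp1 hrel1
    obtain ⟨e2a, e2b, e2c⟩ := stepJ s2 p2 a2 j2 i hp2 hrel2
    by_cases hx : X a1 j1 p1 i = X a2 j2 p2 i
    · simp [meetA_loop, G, hx]
    · rw [meetA_loop, if_neg hx, e1a, e1b, e1c, e2a, e2b, e2c, ih (i+1)]
      simp [G, hx]

-- Skipping d ticks on which neither position changes preserves the search.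
lemma G_skip (a1 j1 a2 j2 : Int) (p1 p2 : Nat) :
    ∀ (d f i : Nat),
      (∀ k, k < d → (i+k)/p1 = i/p1 ∧ (i+k)/p2 = i/p2) →
      X a1 j1 p1 i ≠ X a2 j2 p2 i →
      G a1 j1 a2 j2 p1 p2 f i = if d < f then G a1 j1 a2 j2 p1 p2 (f-d) (i+d) else -1 := by
  intro d
  induction d with
  | zero =>
    intro f i _ _
    cases f with
    | zero => simp [G]
    | succ f => simp
  | succ d ih =>
    intro f i hC hne
    cases f with
    | zero => simp [G]
    | succ f =>
      rw [show G a1 j1 a2 j2 p1 p2 (f+1) i = G a1 j1 a2 j2 p1 p2 f (i+1) by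
            simp [G, hne]]
      by_cases hd : d = 0
      · subst hd
        cases f with
        | zero => simp [G]
        | succ f => simp
      · have h1 := hC 1 (by omega)
        have hne' : X a1 j1 p1 (i+1) ≠ X a2 j2 p2 (i+1) := by
          rw [X_congr a1 j1 p1 h1.1, X_congr a2 j2 p2 h1.2]; exact hne
        have hC' : ∀ k, k < d → (i+1+k)/p1 = (i+1)/p1 ∧ (i+1+k)/p2 = (i+1)/p2 := by
          intro k hk
          have := hC (k+1) (by omega)
          rw [show i+1+k = i+(k+1) by ring, h1.1, h1.2]
          exact this
        rw [ih f (i+1) hC' hne']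
        by_cases hdf : d < f
        · rw [if_pos hdf, if_pos (show d+1 < f+1 by omega),
              show i+1+d = i+(d+1) by ring, show f - d = f+1-(d+1) by omega]
        · rw [if_neg hdf, if_neg (show ¬ d+1 < f+1 by omega)]

-- If i' = n = (i/p+1)*p is reached, the position takes one jump; below n it is unchanged.
lemma side_div (p : Nat) (hp : 0 < p) (i n i' : Nat) (hn : n = (i/p+1)*p)
    (hii : i < i') (hub : i' ≤ n) :
    (i' = n → i'/p = i/p + 1) ∧ (i' ≠ n → i'/p = i/p) := by
  constructor
  · intro he
    subst he; rw [hn, Nat.mul_div_cancel _ hp]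
  · intro he
    exact div_stable p i i' hp (by omega) (by omega)

-- B's loop computes the reference search.
lemma B_eq (a1 j1 a2 j2 : Int) (p1 p2 : Nat) (hp1 : 0 < p1) (hp2 : 0 < p2) :
    ∀ (fuel i n1 n2 : Nat), i < n1 → i < n2 →
      n1 = (i/p1+1)*p1 → n2 = (i/p2+1)*p2 → 10000000 - i < fuel →
      meetB_loop j1 j2 p1 p2 (X a1 j1 p1 i) (X a2 j2 p2 i) n1 n2 i fuel
      = G a1 j1 a2 j2 p1 p2 (10000000 - i) i := by
  intro fuel
  induction fuel with
  | zero => intro i n1 n2 _ _ _ _ hf; omega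
  | succ fuel ih =>
    intro i n1 n2 h1 h2 hn1 hn2 hf
    by_cases hlt : i < 10000000
    · rw [meetB_loop, if_pos hlt]
      by_cases hx : X a1 j1 p1 i = X a2 j2 p2 i
      · rw [if_pos hx]
        obtain ⟨g, hg⟩ : ∃ g, 10000000 - i = g + 1 := ⟨10000000 - i - 1, by omega⟩
        rw [hg]; simp [G, hx]
      · rw [if_neg hx]
        set i' := if n1 ≤ n2 then n1 else n2 with hi'
        have hii : i < i' := by rw [hi']; split <;> omega
        have hub1 : i' ≤ n1 := by rw [hi']; split <;> omega
        have hub2 : i' ≤ n2 := by rw [hi']; split <;> omega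
        obtain ⟨hd1e, hd1n⟩ := side_div p1 hp1 i n1 i' hn1 hii hub1
        obtain ⟨hd2e, hd2n⟩ := side_div p2 hp2 i n2 i' hn2 hii hub2
        have hx1 : (if i' = n1 then X a1 j1 p1 i + j1 else X a1 j1 p1 i) = X a1 j1 p1 i' := by
          split
          · next h => exact (X_succ a1 j1 p1 (hd1e h)).symm
          · next h => exact (X_congr a1 j1 p1 (hd1n h)).symm
        have hx2 : (if i' = n2 then X a2 j2 p2 i + j2 else X a2 j2 p2 i) = X a2 j2 p2 i' := by
          split
          · next h => exact (X_succ a2 j2 p2 (hd2e h)).symm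
          · next h => exact (X_congr a2 j2 p2 (hd2n h)).symm
        have hm1 : (if i' = n1 then n1 + p1 else n1) = (i'/p1+1)*p1 := by
          split
          · next h => rw [hd1e h, hn1]; ring
          · next h => rw [hd1n h, hn1]
        have hm2 : (if i' = n2 then n2 + p2 else n2) = (i'/p2+1)*p2 := by
          split
          · next h => rw [hd2e h, hn2]; ring
          · next h => rw [hd2n h, hn2]
        have hub1' : i' < (if i' = n1 then n1 + p1 else n1) := by split <;> omega
        have hub2' : i' < (if i' = n2 then n2 + p2 else n2) := by split <;> omega
        rw [hx1, hx2]
        rw [ih i' _ _ (hm1 ▸ hub1') (hm2 ▸ hub2') hm1 hm2 (by omega)]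
        -- reference side: skip the ticks strictly between i and i'
        have hC : ∀ k, k < i' - i → (i+k)/p1 = i/p1 ∧ (i+k)/p2 = i/p2 := by
          intro k hk
          exact ⟨div_stable p1 i (i+k) hp1 (by omega) (by omega),
                 div_stable p2 i (i+k) hp2 (by omega) (by omega)⟩
        rw [G_skip a1 j1 a2 j2 p1 p2 (i'-i) (10000000 - i) i hC hx]
        rw [show i + (i' - i) = i' by omega, show 10000000 - i - (i'-i) = 10000000 - i' by omega]
        by_cases hcase : i' < 10000000
        · rw [if_pos (by omega)]
        · rw [if_neg (by omega), show 10000000 - i' = 0 by omega]; rfl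
    · rw [meetB_loop, if_neg hlt, show 10000000 - i = 0 by omega]; rfl

-- ===== VERDICT (by name: the statement is the Claim_ definition above) =====
theorem meet_me_spec : Claim_equal_meet_me := by
  intro pos1 j1 s1 pos2 j2 s2 _
  unfold Spec_meet_me meet_me meet_me_alt
  set p1 : Nat := (if 1 < s1 then s1 else 1).toNat with hp1def
  set p2 : Nat := (if 1 < s2 then s2 else 1).toNat with hp2def
  have hp1 : 0 < p1 := by rw [hp1def]; split <;> omega
  have hp2 : 0 < p2 := by rw [hp2def]; split <;> omega
  have hrel1 : (p1 : Int) = if 1 < s1 then s1 else 1 := by rw [hp1def]; split <;> omega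
  have hrel2 : (p2 : Int) = if 1 < s2 then s2 else 1 := by rw [hp2def]; split <;> omega
  have hX1 : X pos1 j1 p1 0 = pos1 + j1 := by simp [X]
  have hX2 : X pos2 j2 p2 0 = pos2 + j2 := by simp [X]
  have hS1 : sleepInv s1 p1 0 = s1 - 1 := by simp [sleepInv]
  have hS2 : sleepInv s2 p2 0 = s2 - 1 := by simp [sleepInv]
  have hA := A_eq s1 s2 pos1 j1 pos2 j2 p1 p2 hp1 hp2 hrel1 hrel2 10000000 0
  rw [hX1, hX2, hS1, hS2] at hA
  simp only [Nat.zero_mod, Nat.cast_zero] at hA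
  have hB := B_eq pos1 j1 pos2 j2 p1 p2 hp1 hp2 10000001 0 p1 p2 hp1 hp2
    (by simp) (by simp) (by omega)
  rw [hX1, hX2] at hB
  simp only [Nat.sub_zero] at hB
  rw [hA, ← hB]
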